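-- pv_equiv track=rewrite | github.com/koeppl/aspstring | brute/closest_string.py | local_hamming_distance
-- ===== SOURCE A (Python) =====
-- def hamming_distance(textA, textB):
-- 	assert len(textA) <= len(textB), f'{textA} must be at least as long as {textB}'
-- 	return len([pos for pos in range(len(textA)) if textA[pos] != textB[pos]])
--
-- def local_hamming_distance(text : str, string : str):
-- 	n = len(string)
-- 	min_dist = len(text)
-- 	for offset in range(n + 1 - len(text)):
-- 		local_dist = hamming_distance(text, string[offset:])
-- 		if local_dist < min_dist:
-- 			min_dist = local_dist
-- 	return min_dist
-- ===== SOURCE B (Python) =====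
-- def local_hamming_distance(text: str, string: str):
--     m = len(text)
--     n = len(string)
--     if m > n:
--         return m
--     # index of text: character -> list of positions where it occurs
--     pos = {}
--     for i, c in enumerate(text):
--         pos[c] = pos.get(c, []) + [i]
--     # matches[off] = number of aligned equal characters at offset off
--     matches = [0] * (n - m + 1)
--     for j, c in enumerate(string):
--         for i in pos.get(c, []):
--             off = j - i
--             if 0 <= off <= n - m:
--                 matches[off] += 1
--     return m - max(matches)
-- ===== Notes on version B (the rewrite author's own statement) =====
-- stated objective: alternative
-- what changed: Instead of recomputing the Hamming distance from scratch at every offset, B builds a character->positions index of the text once and makes a single pass over the string, crediting a per-offset match counter for each equal-character pair, then returns len(text) minus the best match count.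
import Mathlib
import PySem

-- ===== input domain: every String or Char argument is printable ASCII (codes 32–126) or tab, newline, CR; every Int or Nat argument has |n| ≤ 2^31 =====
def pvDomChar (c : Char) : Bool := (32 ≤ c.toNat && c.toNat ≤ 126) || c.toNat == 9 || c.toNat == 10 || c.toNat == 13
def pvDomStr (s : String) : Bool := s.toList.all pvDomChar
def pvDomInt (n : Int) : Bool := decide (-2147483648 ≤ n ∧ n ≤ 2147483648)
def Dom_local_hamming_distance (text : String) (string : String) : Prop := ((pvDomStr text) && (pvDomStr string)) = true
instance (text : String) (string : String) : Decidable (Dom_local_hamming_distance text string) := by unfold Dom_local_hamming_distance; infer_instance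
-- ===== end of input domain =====

-- B replaces A's per-offset rescan by a one-time character->positions index of the text and a
-- single pass over the string crediting per-offset match counters; same results, alternative algorithm.

-- ===== PORT A =====
-- helper hamming_distance (its assert never fires inside local_hamming_distance, so it is not modelled)
def pvHamming (a b : List Char) : Int :=
  ((PySem.List.pyRange 0 (a.length : Int) 1).filter
    (fun p => decide (PySem.List.pyGet? a p ≠ PySem.List.pyGet? b p))).length

def local_hamming_distance (text : String) (string : String) : Int :=
  let t := text.toList
  let s := string.toList
  let n : Int := (s.length : Int)
  let min_dist : Int := (t.length : Int)
  (PySem.List.pyRange 0 (n + 1 - (t.length : Int)) 1).foldl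
    (fun min_dist offset =>
      let local_dist := pvHamming t (PySem.List.slice s (some offset) none)
      if local_dist < min_dist then local_dist else min_dist)
    min_dist

-- ===== PORT B =====
def local_hamming_distance_alt (text : String) (string : String) : Int :=
  let t := text.toList
  let s := string.toList
  let m := t.length
  let n := s.length
  if m > n then (m : Int) else
    let pos : PySem.Dict Char (List Int) :=
      (PySem.List.enumerate t).foldl
        (fun d ic => d.modify ic.2 [] (fun l => l ++ [ic.1])) PySem.Dict.empty
    let matchesL : List Int :=
      (PySem.List.enumerate s).foldl
        (fun ms jc =>
          (pos.getD jc.2 []).foldl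
            (fun ms i =>
              let off := jc.1 - i
              if 0 ≤ off ∧ off ≤ (n : Int) - (m : Int) then
                ms.modify off.toNat (· + 1)
              else ms) ms)
        (List.replicate (n - m + 1) (0 : Int))
    (m : Int) - ((PySem.List.max? matchesL (fun x => x)).getD 0)

-- ===== PRECONDITION & SPEC =====
def Spec_local_hamming_distance (text : String) (string : String) (out : Int) : Prop := out = local_hamming_distance_alt text string
instance (text : String) (string : String) (out : Int) : Decidable (Spec_local_hamming_distance text string out) := by unfold Spec_local_hamming_distance; infer_instance

-- ===== CLAIM (what is proved, stated in full; the proofs are below) =====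
def Claim_equal_local_hamming_distance : Prop := ∀ (text : String) (string : String), Dom_local_hamming_distance text string → Spec_local_hamming_distance text string (local_hamming_distance text string)

-- ===== LEMMAS AND PROOFS =====

-- number of aligned equal characters of t against s at offset k
def pvMC (t s : List Char) (k : Nat) : Nat :=
  (List.range t.length).countP (fun i => decide (t[i]? = s[k + i]?))

-- the list of positions of c in t, as B's dict produces it
def pvPosL (t : List Char) (c : Char) : List Int :=
  ((PySem.List.enumerate t).filter (fun ic => ic.2 == c)).map (·.1)

lemma getD_modify_list (l : List Int) (u k : Nat) (hk : k < l.length) :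
    (l.modify u (· + 1)).getD k 0 = l.getD k 0 + if u = k then 1 else 0 := by
  rw [List.getD_eq_getElem?_getD, List.getD_eq_getElem?_getD, List.getElem?_modify]
  rw [List.getElem?_eq_getElem hk]
  split <;> simp

lemma inner_len (L : List Int) (j : Int) (B : Int) (ms : List Int) :
    (L.foldl (fun ms i => if 0 ≤ j - i ∧ j - i ≤ B then ms.modify (j - i).toNat (· + 1) else ms) ms).length
      = ms.length := by
  induction L generalizing ms with
  | nil => rfl
  | cons a L ih =>
    simp only [List.foldl_cons]
    rw [ih]
    split <;> simp [List.length_modify]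

lemma inner_get (L : List Int) (j : Int) (B : Int) (ms : List Int) (k : Nat)
    (hk : k < ms.length) :
    (L.foldl (fun ms i => if 0 ≤ j - i ∧ j - i ≤ B then ms.modify (j - i).toNat (· + 1) else ms) ms).getD k 0
      = ms.getD k 0 + (L.countP (fun i => decide (0 ≤ j - i ∧ j - i ≤ B) && ((j - i).toNat == k)) : Int) := by
  induction L generalizing ms with
  | nil => simp
  | cons a L ih =>
    simp only [List.foldl_cons, List.countP_cons]
    by_cases h : 0 ≤ j - a ∧ j - a ≤ B
    · rw [if_pos h, ih _ (by simpa [List.length_modify] using hk), getD_modify_list _ _ _ hk]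
      have hd : decide (0 ≤ j - a ∧ j - a ≤ B) = true := decide_eq_true h
      simp only [hd, Bool.true_and]
      by_cases hk2 : (j - a).toNat = k
      · have hb : ((j - a).toNat == k) = true := by simpa using hk2
        rw [if_pos hk2]
        simp only [hb, if_true]
        push_cast
        ring
      · have hb : ((j - a).toNat == k) = false := by simpa using hk2
        rw [if_neg hk2]
        simp only [hb, Bool.false_eq_true, if_false]
        push_cast
        ring
    · rw [if_neg h, ih _ hk]
      have hd : decide (0 ≤ j - a ∧ j - a ≤ B) = false := decide_eq_false h
      simp only [hd, Bool.false_and, Bool.false_eq_true, if_false]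
      push_cast
      ring

lemma pos_getD (E : List (Int × Char)) (d : PySem.Dict Char (List Int)) (c : Char) :
    (E.foldl (fun d ic => d.modify ic.2 [] (fun l => l ++ [ic.1])) d).getD c []
      = d.getD c [] ++ ((E.filter (fun ic => ic.2 == c)).map (·.1)) := by
  induction E generalizing d with
  | nil => simp
  | cons p E ih =>
    simp only [List.foldl_cons, List.filter_cons]
    rw [ih]
    by_cases hc : p.2 = c
    · have : (p.2 == c) = true := by simpa using hc
      rw [this]
      simp only [if_true, List.map_cons]
      rw [PySem.Dict.getD_modify]
      rw [if_pos hc.symm, hc]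
      simp [List.append_assoc]
    · have : (p.2 == c) = false := by simpa using hc
      rw [this]
      simp only [Bool.false_eq_true, if_false]
      rw [PySem.Dict.getD_modify, if_neg (fun h => hc h.symm)]

lemma mem_enumerate (xs : List Char) (p : Int × Char) (s : Int) :
    p ∈ PySem.List.enumerate xs s ↔
      ∃ u : Nat, u < xs.length ∧ p.1 = s + u ∧ xs[u]? = some p.2 := by
  induction xs generalizing s with
  | nil => simp [PySem.List.enumerate_nil]
  | cons x xs ih =>
    rw [PySem.List.enumerate_cons]
    simp only [List.mem_cons, ih]
    constructor
    · rintro (h | ⟨u, hu, h1, h2⟩)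
      · exact ⟨0, by simp, by simp [h], by simp [h]⟩
      · exact ⟨u + 1, by simpa using hu, by push_cast; omega, by simpa using h2⟩
    · rintro ⟨u, hu, h1, h2⟩
      cases u with
      | zero =>
        left
        simp only [List.getElem?_cons_zero, Option.some.injEq] at h2
        cases p
        simp_all
      | succ u =>
        right
        exact ⟨u, by simp only [List.length_cons] at hu; omega, by push_cast at h1 ⊢; omega, by simpa using h2⟩

lemma countP_enumerate (xs : List Char) (q : Int × Char → Bool) (s : Int) :
    (PySem.List.enumerate xs s).countP q
      = (List.range xs.length).countP (fun (u : Nat) => q (s + (u : Int), xs.getD u default)) := by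
  induction xs generalizing s with
  | nil => simp [PySem.List.enumerate_nil]
  | cons x xs ih =>
    rw [PySem.List.enumerate_cons]
    rw [List.countP_cons, ih (s + 1)]
    rw [List.length_cons, List.range_succ_eq_map, List.countP_cons, List.countP_map]
    have : ∀ u : Nat, q (s + 1 + (u : Int), xs.getD u default)
        = q (s + ((u + 1 : Nat) : Int), (x :: xs).getD (u + 1) default) := by
      intro u
      rw [List.getD_cons_succ]
      congr 2
      push_cast
      ring
    simp only [Function.comp_def, this]
    simp

lemma hamA (t s : List Char) (k : Nat) :
    pvHamming t (s.drop k) = (t.length : Int) - (pvMC t s k : Int) := by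
  unfold pvHamming pvMC
  rw [PySem.List.pyRange_one]
  simp only [sub_zero, Int.toNat_natCast, zero_add]
  rw [List.filter_map, List.length_map, ← List.countP_eq_length_filter]
  have hp : (fun (u : Nat) => decide (PySem.List.pyGet? t ((u : Int)) ≠ PySem.List.pyGet? (s.drop k) ((u : Int))))
      = (fun (u : Nat) => !(decide (t[u]? = s[k + u]?))) := by
    funext u
    rw [PySem.List.pyGet?_natCast, PySem.List.pyGet?_natCast, List.getElem?_drop]
    simp [decide_not]
  have hsplit : (List.range t.length).countP (fun u => decide (t[u]? = s[k + u]?))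
      + (List.range t.length).countP (fun u => !(decide (t[u]? = s[k + u]?))) = (List.range t.length).length := by
    simpa using (List.length_eq_countP_add_countP
      (l := List.range t.length) (p := fun u => decide (t[u]? = s[k + u]?))).symm
  simp only [Function.comp_def, hp]
  simp only [List.length_range] at hsplit
  omega

lemma posL_nodup (t : List Char) (c : Char) : (pvPosL t c).Nodup := by
  unfold pvPosL
  apply List.Nodup.sublist (List.Sublist.map _ List.filter_sublist)
  rw [PySem.List.map_fst_enumerate]
  exact PySem.List.nodup_pyRange_one 0 (0 + t.length)

lemma posL_mem (t : List Char) (c : Char) (x : Int) :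
    x ∈ pvPosL t c ↔ 0 ≤ x ∧ x.toNat < t.length ∧ t[x.toNat]? = some c := by
  unfold pvPosL
  simp only [List.mem_map, List.mem_filter, mem_enumerate, beq_iff_eq]
  constructor
  · rintro ⟨⟨i, ch⟩, ⟨⟨u, hu, h1, h2⟩, hc⟩, hx⟩
    simp only at h1 hc hx
    subst hc
    subst hx
    have hxu : i.toNat = u := by omega
    refine ⟨by omega, by omega, by rwa [hxu]⟩
  · rintro ⟨hx0, hxl, hxg⟩
    exact ⟨(x, c), ⟨⟨x.toNat, hxl, by omega, hxg⟩, rfl⟩, rfl⟩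

lemma cnt_eq (t : List Char) (j : Int) (c : Char) (k : Nat) (B : Int) (hk : (k : Int) ≤ B) :
    ((pvPosL t c).countP (fun i => decide (0 ≤ j - i ∧ j - i ≤ B) && ((j - i).toNat == k)))
      = if 0 ≤ j - (k : Int) ∧ (j - (k : Int)).toNat < t.length ∧ t[(j - (k : Int)).toNat]? = some c
        then 1 else 0 := by
  have hfun : (fun (i : Int) => decide (0 ≤ j - i ∧ j - i ≤ B) && ((j - i).toNat == k))
      = (fun (i : Int) => i == j - (k : Int)) := by
    funext i
    by_cases h : j - i = (k : Int)
    · have hi : i = j - (k : Int) := by omega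
      have h1 : decide (0 ≤ j - i ∧ j - i ≤ B) = true := by
        apply decide_eq_true
        constructor <;> omega
      have h2 : ((j - i).toNat == k) = true := by
        simp only [beq_iff_eq]
        omega
      have h3 : (i == j - (k : Int)) = true := by simpa using hi
      rw [h1, h2, h3, Bool.true_and]
    · have h3 : (i == j - (k : Int)) = false := by
        simp only [beq_eq_false_iff_ne, ne_eq]
        omega
      rw [h3]
      by_cases h4 : 0 ≤ j - i ∧ j - i ≤ B
      · have h5 : ((j - i).toNat == k) = false := by
          simp only [beq_eq_false_iff_ne, ne_eq]
          omega
        simp [h5]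
      · have h6 : decide (0 ≤ j - i ∧ j - i ≤ B) = false := decide_eq_false h4
        rw [h6, Bool.false_and]
  rw [hfun, ← List.count_eq_countP]
  by_cases hmem : (j - (k : Int)) ∈ pvPosL t c
  · rw [List.count_eq_one_of_mem (posL_nodup t c) hmem, if_pos ((posL_mem t c _).mp hmem)]
  · rw [List.count_eq_zero_of_not_mem hmem, if_neg (fun h => hmem ((posL_mem t c _).mpr h))]

lemma outer_len (E : List (Int × Char)) (g : Char → List Int) (B : Int) (ms : List Int) :
    (E.foldl (fun ms jc => (g jc.2).foldl
        (fun ms i => if 0 ≤ jc.1 - i ∧ jc.1 - i ≤ B then ms.modify (jc.1 - i).toNat (· + 1) else ms) ms) ms).length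
      = ms.length := by
  induction E generalizing ms with
  | nil => rfl
  | cons p E ih =>
    simp only [List.foldl_cons]
    rw [ih, inner_len]

lemma outer_get (E : List (Int × Char)) (g : Char → List Int) (B : Int) (ms : List Int) (k : Nat)
    (hk : k < ms.length) :
    (E.foldl (fun ms jc => (g jc.2).foldl
        (fun ms i => if 0 ≤ jc.1 - i ∧ jc.1 - i ≤ B then ms.modify (jc.1 - i).toNat (· + 1) else ms) ms) ms).getD k 0
      = ms.getD k 0 + ((E.map (fun jc =>
          ((g jc.2).countP (fun i => decide (0 ≤ jc.1 - i ∧ jc.1 - i ≤ B) && ((jc.1 - i).toNat == k)) : Int))).sum) := by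
  induction E generalizing ms with
  | nil => simp
  | cons p E ih =>
    simp only [List.foldl_cons, List.map_cons, List.sum_cons]
    rw [ih _ (by rw [inner_len]; exact hk), inner_get _ _ _ _ _ hk]
    ring

lemma sum_cnt (t s : List Char) (k : Nat) (hmn : t.length ≤ s.length) (hk : k ≤ s.length - t.length) :
    ((PySem.List.enumerate s).map (fun jc =>
        (if 0 ≤ jc.1 - (k : Int) ∧ (jc.1 - (k : Int)).toNat < t.length ∧ t[(jc.1 - (k : Int)).toNat]? = some jc.2
         then (1 : Int) else 0))).sum
      = (pvMC t s k : Int) := by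
  have hone := PySem.List.sum_map_ite_one_zero
    (p := fun (jc : Int × Char) => decide (0 ≤ jc.1 - (k : Int) ∧ (jc.1 - (k : Int)).toNat < t.length ∧ t[(jc.1 - (k : Int)).toNat]? = some jc.2))
    (PySem.List.enumerate s)
  simp only [decide_eq_true_eq] at hone
  rw [hone, countP_enumerate]
  congr 1
  have hsn : s.length = k + (t.length + (s.length - t.length - k)) := by omega
  rw [hsn, List.range_add, List.countP_append, List.range_add, List.map_append, List.countP_append,
      List.countP_map, List.countP_map, List.countP_map]
  simp only [Function.comp_def, zero_add]
  have h1 : List.countP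
        (fun (u : Nat) => decide (0 ≤ (u : Int) - (k : Int) ∧ ((u : Int) - (k : Int)).toNat < t.length ∧ t[((u : Int) - (k : Int)).toNat]? = some (s.getD u default)))
        (List.range k) = 0 := by
    rw [List.countP_eq_zero]
    intro u hu
    simp only [List.mem_range] at hu
    simp only [decide_eq_true_eq]
    rintro ⟨h0, -, -⟩
    omega
  have h3 : List.countP
        (fun (x : Nat) => decide
          (0 ≤ ((k + (t.length + x) : Nat) : Int) - (k : Int) ∧
            (((k + (t.length + x) : Nat) : Int) - (k : Int)).toNat < t.length ∧
              t[(((k + (t.length + x) : Nat) : Int) - (k : Int)).toNat]? = some (s.getD (k + (t.length + x)) default)))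
        (List.range (s.length - t.length - k)) = 0 := by
    rw [List.countP_eq_zero]
    intro u hu
    simp only [decide_eq_true_eq]
    rintro ⟨-, h1, -⟩
    omega
  have h2 : List.countP
        (fun (x : Nat) => decide
          (0 ≤ ((k + x : Nat) : Int) - (k : Int) ∧
            (((k + x : Nat) : Int) - (k : Int)).toNat < t.length ∧
              t[(((k + x : Nat) : Int) - (k : Int)).toNat]? = some (s.getD (k + x) default)))
        (List.range t.length) = pvMC t s k := by
    unfold pvMC
    apply List.countP_congr
    intro x hx
    simp only [List.mem_range] at hx
    have hkx : k + x < s.length := by omega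
    have htn : (((k + x : Nat) : Int) - (k : Int)).toNat = x := by omega
    have egd : s.getD (k + x) default = s[k + x] := List.getD_eq_getElem _ _ hkx
    have eopt : s[k + x]? = some s[k + x] := List.getElem?_eq_getElem hkx
    have hiff : (0 ≤ ((k + x : Nat) : Int) - (k : Int) ∧ x < t.length ∧ t[x]? = some s[k + x])
        ↔ (t[x]? = some s[k + x]) := by
      constructor
      · rintro ⟨-, -, h⟩
        exact h
      · intro h
        exact ⟨by omega, hx, h⟩
    simp only [htn, egd, eopt, decide_eq_true_eq]
    exact hiff
  rw [h1, h2, h3]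
  omega

-- per-cell value of B's matches array
lemma matchesChar (t s : List Char) (hmn : t.length ≤ s.length) :
    (PySem.List.enumerate s).foldl
        (fun ms jc => (pvPosL t jc.2).foldl
          (fun ms i => if 0 ≤ jc.1 - i ∧ jc.1 - i ≤ (s.length : Int) - (t.length : Int)
                       then ms.modify (jc.1 - i).toNat (· + 1) else ms) ms)
        (List.replicate (s.length - t.length + 1) (0 : Int))
      = (List.range (s.length - t.length + 1)).map (fun k => (pvMC t s k : Int)) := by
  apply List.ext_getElem
  · rw [outer_len]
    simp
  · intro k h1 h2
    rw [outer_len] at h1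
    simp only [List.length_replicate] at h1
    have hrep : k < (List.replicate (s.length - t.length + 1) (0 : Int)).length := by
      simpa using h1
    rw [← List.getD_eq_getElem _ 0]
    rw [outer_get _ _ _ _ k hrep]
    have hz : (List.replicate (s.length - t.length + 1) (0 : Int)).getD k 0 = 0 := by
      rw [List.getD_eq_getElem _ _ hrep]
      exact List.getElem_replicate _
    rw [hz, zero_add]
    have hcnt : ∀ jc : Int × Char,
        (((pvPosL t jc.2).countP (fun i =>
            decide (0 ≤ jc.1 - i ∧ jc.1 - i ≤ (s.length : Int) - (t.length : Int)) && ((jc.1 - i).toNat == k)) : Nat) : Int)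
          = if 0 ≤ jc.1 - (k : Int) ∧ (jc.1 - (k : Int)).toNat < t.length ∧ t[(jc.1 - (k : Int)).toNat]? = some jc.2
            then (1 : Int) else 0 := by
      intro jc
      rw [cnt_eq t jc.1 jc.2 k _ (by omega)]
      split <;> simp
    simp only [hcnt]
    rw [sum_cnt t s k hmn (by omega)]
    rw [List.getElem_map, List.getElem_range]

-- ===== VERDICT (by name: the statement is the Claim_ definition above) =====
theorem local_hamming_distance_spec : Claim_equal_local_hamming_distance := by
  intro text string _
  unfold Spec_local_hamming_distance local_hamming_distance local_hamming_distance_alt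
  set t := text.toList with ht
  set s := string.toList with hs
  by_cases hmn : t.length ≤ s.length
  · -- text fits somewhere in string
    rw [if_neg (by omega)]
    have hpos : ∀ c : Char,
        ((PySem.List.enumerate t).foldl (fun d ic => d.modify ic.2 [] (fun l => l ++ [ic.1]))
          PySem.Dict.empty).getD c [] = pvPosL t c := by
      intro c
      rw [pos_getD]
      simp [pvPosL, PySem.Dict.getD_empty]
    simp only [hpos]
    rw [matchesChar t s hmn]
    have hK : (s.length : Int) + 1 - (t.length : Int) = ((s.length - t.length + 1 : Nat) : Int) := by
      push_cast
      omega
    rw [hK, PySem.List.pyRange_one]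
    simp only [sub_zero, Int.toNat_natCast, zero_add]
    rw [List.foldl_map]
    simp only [PySem.List.slice_from_natCast]
    simp only [hamA]
    have hmin : ∀ (acc x : Int), (if x < acc then x else acc) = min acc x := by
      intro acc x
      rw [min_def]
      split_ifs <;> omega
    simp only [hmin]
    have hfuse : (List.range (s.length - t.length + 1)).foldl
          (fun acc u => min acc ((t.length : Int) - (pvMC t s u : Int))) ((t.length : Int))
        = (((List.range (s.length - t.length + 1)).map (fun k => (pvMC t s k : Int))).map
            (fun x => (t.length : Int) - x)).foldl min ((t.length : Int)) := by
      rw [List.map_map]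
      exact List.foldl_map.symm
    rw [hfuse]
    have hne : (List.range (s.length - t.length + 1)).map (fun k => (pvMC t s k : Int)) ≠ [] := by
      simp
    cases hM : PySem.List.max? ((List.range (s.length - t.length + 1)).map (fun k => (pvMC t s k : Int))) (fun x => x) with
    | none => exact absurd ((PySem.List.max?_eq_none_iff _ _).mp hM) hne
    | some M =>
      simp only [Option.getD_some]
      have hMmem : M ∈ (List.range (s.length - t.length + 1)).map (fun k => (pvMC t s k : Int)) :=
        PySem.List.max?_mem hM
      have hub : ∀ y ∈ (List.range (s.length - t.length + 1)).map (fun k => (pvMC t s k : Int)), y ≤ M := by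
        simpa using PySem.List.max?_isMax hM
      apply le_antisymm
      · exact (PySem.List.foldl_min_le _ _).2 _ (List.mem_map.mpr ⟨M, hMmem, rfl⟩)
      · rcases PySem.List.foldl_min_mem
            (((List.range (s.length - t.length + 1)).map (fun k => (pvMC t s k : Int))).map
              (fun x => (t.length : Int) - x)) ((t.length : Int)) with h | h
        · rw [h]
          obtain ⟨k0, -, hk0⟩ := List.mem_map.mp hMmem
          have hM0 : 0 ≤ M := hk0 ▸ Int.natCast_nonneg _
          omega
        · obtain ⟨x, hxmem, hxeq⟩ := List.mem_map.mp h
          have hxM := hub x hxmem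
          rw [← hxeq]
          omega
  · -- text longer than string: the offset range is empty
    rw [if_pos (by omega)]
    dsimp only
    rw [PySem.List.pyRange_one_eq_nil (by omega)]
    simp
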